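-- pv_equiv track=rewrite | github.com/mtocco/advent2024 | advent2024day2.py | determineSafe
-- ===== SOURCE A (Python) =====
-- def determineSafe(nums):
--     sortedNums = nums.copy()
--     if nums[0] < nums[1]:
--         sortedNums.sort()
--     else:
--         sortedNums.sort(reverse=True)
--
--     if sortedNums != nums:
--         return False
--     for i in range(len(nums)-1):
--         if int(nums[i+1]) == int(nums[i]):
--             return False
--         if abs(int(nums[i+1]) - int(nums[i])) > 3:
--             return False
--     return True
-- ===== SOURCE B (Python) =====
-- def determineSafe(nums):
--     if nums[0] < nums[1]:
--         lo, hi = 1, 3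
--     else:
--         lo, hi = -3, -1
--     return all(lo <= b - a <= hi for a, b in zip(nums, nums[1:]))
-- ===== Notes on version B (the rewrite author's own statement) =====
-- stated objective: faster
-- what changed: Replaced A's copy-and-sort plus separate equality/gap loop with a single linear pass that fixes the allowed gap interval ([1,3] or [-3,-1]) from the first pair and checks every adjacent difference once.
import Mathlib
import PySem

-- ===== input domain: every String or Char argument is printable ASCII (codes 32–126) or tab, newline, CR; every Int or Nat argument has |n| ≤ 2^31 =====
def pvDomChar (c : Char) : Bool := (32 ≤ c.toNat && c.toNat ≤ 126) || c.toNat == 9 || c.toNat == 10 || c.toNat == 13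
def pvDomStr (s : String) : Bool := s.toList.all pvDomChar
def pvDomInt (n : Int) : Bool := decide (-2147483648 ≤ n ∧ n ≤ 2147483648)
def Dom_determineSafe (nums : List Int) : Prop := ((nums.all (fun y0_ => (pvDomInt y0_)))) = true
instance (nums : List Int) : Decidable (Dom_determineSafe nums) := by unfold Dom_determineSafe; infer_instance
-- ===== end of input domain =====

-- B replaces A's copy-and-sort check plus second loop with one linear pass over adjacent
-- differences, testing them against the interval fixed by the first pair (asymptotically faster).


-- ===== PORT A =====
-- the early-returning 'for i in range(len(nums)-1)' loop of A, index by index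
def safeLoopA (nums : List Int) : List Int → Bool
  | [] => true
  | i :: rest =>
    if PySem.List.pyGetD nums (i + 1) 0 = PySem.List.pyGetD nums i 0 then false
    else if 3 < |PySem.List.pyGetD nums (i + 1) 0 - PySem.List.pyGetD nums i 0| then false
    else safeLoopA nums rest

def determineSafe (nums : List Int) : Bool :=
  match PySem.List.pyGet? nums 0, PySem.List.pyGet? nums 1 with
  | some a, some b =>
    let sortedNums :=
      if a < b then PySem.List.sorted nums (fun x => x) false
      else PySem.List.sorted nums (fun x => x) true
    if sortedNums ≠ nums then false
    else safeLoopA nums (PySem.List.pyRange 0 ((nums.length : Int) - 1) 1)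
  | _, _ => false  -- IndexError in Python (excluded by Pre_)

-- ===== PORT B =====
def determineSafe_alt (nums : List Int) : Bool :=
  match PySem.List.pyGet? nums 0 with
  | none => false  -- IndexError in Python (excluded by Pre_)
  | some a =>
    match PySem.List.pyGet? nums 1 with
    | none => false  -- IndexError in Python (excluded by Pre_)
    | some b =>
      let lohi : Int × Int := if a < b then (1, 3) else (-3, -1)
      (nums.zip (nums.drop 1)).all fun p =>
        decide (lohi.1 ≤ p.2 - p.1) && decide (p.2 - p.1 ≤ lohi.2)

-- ===== PRECONDITION & SPEC =====
-- Pre_ excludes exactly the lists of length < 2, on which Python A raises IndexError.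
def Pre_determineSafe (nums : List Int) : Prop := 2 ≤ nums.length
instance (nums : List Int) : Decidable (Pre_determineSafe nums) := by unfold Pre_determineSafe; infer_instance

def pvWitness_determineSafe : List Int := [1, 2, 4]

def Spec_determineSafe (nums : List Int) (out : Bool) : Prop := out = determineSafe_alt nums
instance (nums : List Int) (out : Bool) : Decidable (Spec_determineSafe nums out) := by unfold Spec_determineSafe; infer_instance

-- ===== CLAIM (what is proved, stated in full; the proofs are below) =====
def Claim_equal_determineSafe : Prop := ∀ (nums : List Int), Dom_determineSafe nums → Pre_determineSafe nums → Spec_determineSafe nums (determineSafe nums)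

-- ===== LEMMAS AND PROOFS =====

-- A's loop with an index list returns true iff every index in the list passes both tests.
theorem loopA_eq_all (nums : List Int) (l : List Int) :
    safeLoopA nums l =
      l.all (fun i =>
        !(PySem.List.pyGetD nums (i + 1) 0 == PySem.List.pyGetD nums i 0) &&
        !(decide (3 < |PySem.List.pyGetD nums (i + 1) 0 - PySem.List.pyGetD nums i 0|))) := by
  induction l with
  | nil => rfl
  | cons i rest ih =>
    simp only [safeLoopA, List.all_cons]
    by_cases h1 : PySem.List.pyGetD nums (i + 1) 0 = PySem.List.pyGetD nums i 0 <;>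
      by_cases h2 : 3 < |PySem.List.pyGetD nums (i + 1) 0 - PySem.List.pyGetD nums i 0| <;>
        simp [h1, h2, ih]

-- B's zip-of-adjacent-pairs test, as a statement about indices.
theorem zip_all_iff (nums : List Int) (p : Int → Int → Bool) :
    ((nums.zip (nums.drop 1)).all fun q => p q.1 q.2) = true ↔
      ∀ (k : Nat) (hk : k + 1 < nums.length), p nums[k] nums[k + 1] = true := by
  rw [List.all_eq_true]
  constructor
  · intro h k hk
    have hm : (nums[k], nums[k + 1]) ∈ nums.zip (nums.drop 1) := by
      have hlen : k < (nums.zip (nums.drop 1)).length := by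
        simp [List.length_zip]; omega
      have : (nums.zip (nums.drop 1))[k] = (nums[k], nums[k + 1]) := by
        simp [List.getElem_zip]
      exact this ▸ List.getElem_mem hlen
    exact h _ hm
  · intro h q hq
    obtain ⟨k, hk, rfl⟩ := List.mem_iff_getElem.mp hq
    have hk' : k + 1 < nums.length := by
      simp [List.length_zip] at hk; omega
    have : (nums.zip (nums.drop 1))[k] = (nums[k], nums[k + 1]) := by
      simp [List.getElem_zip]
    rw [this]
    exact h k hk'

-- ascending sorted-copy equality names the Pairwise ≤ property
theorem sorted_eq_iff_pairwise_le (nums : List Int) :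
    PySem.List.sorted nums (fun x => x) false = nums ↔ nums.Pairwise (· ≤ ·) := by
  constructor
  · intro h
    have := PySem.List.sorted_pairwise nums (fun x => x)
    rw [h] at this
    exact this
  · intro h
    exact PySem.List.sorted_eq_self_of_pairwise nums (fun x => x) h

theorem sorted_rev_eq_iff_pairwise_ge (nums : List Int) :
    PySem.List.sorted nums (fun x => x) true = nums ↔ nums.Pairwise (fun a b => b ≤ a) := by
  constructor
  · intro h
    have := PySem.List.sorted_pairwise_rev nums (fun x => x)
    rw [h] at this
    exact this
  · intro h
    exact PySem.List.sorted_rev_eq_self_of_pairwise nums (fun x => x) h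

-- Pairwise order on Int as an adjacent-index condition
theorem pairwise_le_iff_adj (nums : List Int) :
    nums.Pairwise (· ≤ ·) ↔ ∀ (k : Nat), k + 1 < nums.length → nums[k]! ≤ nums[k + 1]! := by
  rw [← List.isChain_iff_pairwise, List.isChain_iff_getElem]
  constructor
  · intro h k hk
    have := h k (by omega)
    simpa [List.getElem!_eq_getElem?_getD, List.getElem?_eq_getElem, hk,
      (by omega : k < nums.length)] using this
  · intro h k hk
    have := h k (by omega)
    simpa [List.getElem!_eq_getElem?_getD, List.getElem?_eq_getElem,
      (by omega : k + 1 < nums.length), (by omega : k < nums.length)] using this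

theorem pairwise_ge_iff_adj (nums : List Int) :
    nums.Pairwise (fun a b => b ≤ a) ↔ ∀ (k : Nat), k + 1 < nums.length → nums[k + 1]! ≤ nums[k]! := by
  rw [← List.isChain_iff_pairwise, List.isChain_iff_getElem]
  constructor
  · intro h k hk
    have := h k (by omega)
    simpa [List.getElem!_eq_getElem?_getD, List.getElem?_eq_getElem, hk,
      (by omega : k < nums.length)] using this
  · intro h k hk
    have := h k (by omega)
    simpa [List.getElem!_eq_getElem?_getD, List.getElem?_eq_getElem,
      (by omega : k + 1 < nums.length), (by omega : k < nums.length)] using this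

-- A's loop over range(len-1), as an adjacent-index condition
theorem loopA_true_iff (nums : List Int) :
    safeLoopA nums (PySem.List.pyRange 0 ((nums.length : Int) - 1) 1) = true ↔
      ∀ (k : Nat), k + 1 < nums.length →
        nums[k + 1]! ≠ nums[k]! ∧ |nums[k + 1]! - nums[k]!| ≤ 3 := by
  rw [loopA_eq_all, List.all_eq_true]
  constructor
  · intro h k hk
    have hmem : (k : Int) ∈ PySem.List.pyRange 0 ((nums.length : Int) - 1) 1 := by
      rw [PySem.List.mem_pyRange_one]; omega
    have := h _ hmem
    have e1 : PySem.List.pyGetD nums ((k : Int) + 1) 0 = nums[k + 1]! := by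
      have := PySem.List.pyGetD_natCast nums (k + 1) 0
      simpa [List.getElem!_eq_getElem?_getD] using by push_cast at this ⊢; exact this
    have e0 : PySem.List.pyGetD nums (k : Int) 0 = nums[k]! := by
      rw [PySem.List.pyGetD_natCast nums k 0, List.getElem!_eq_getElem?_getD,
        List.getD_eq_getElem?_getD]
      rfl
    rw [e1, e0] at this
    simp only [Bool.and_eq_true, Bool.not_eq_true', beq_eq_false_iff_ne, decide_eq_false_iff_not] at this
    exact ⟨this.1, by omega⟩
  · intro h i hi
    rw [PySem.List.mem_pyRange_one] at hi
    obtain ⟨hi0, hi1⟩ := hi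
    obtain ⟨k, rfl⟩ := Int.eq_ofNat_of_zero_le hi0
    have hk : k + 1 < nums.length := by omega
    have := h k hk
    have e1 : PySem.List.pyGetD nums ((k : Int) + 1) 0 = nums[k + 1]! := by
      have := PySem.List.pyGetD_natCast nums (k + 1) 0
      simpa [List.getElem!_eq_getElem?_getD] using by push_cast at this ⊢; exact this
    have e0 : PySem.List.pyGetD nums (k : Int) 0 = nums[k]! := by
      rw [PySem.List.pyGetD_natCast nums k 0, List.getElem!_eq_getElem?_getD,
        List.getD_eq_getElem?_getD]
      rfl
    rw [e1, e0]
    simp only [Bool.and_eq_true, Bool.not_eq_true', beq_eq_false_iff_ne, decide_eq_false_iff_not]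
    exact ⟨this.1, by omega⟩

-- ===== VERDICT (by name: the statement is the Claim_ definition above) =====
theorem determineSafe_spec : Claim_equal_determineSafe := by
  intro nums _ hpre
  unfold Spec_determineSafe
  unfold Pre_determineSafe at hpre
  obtain ⟨a, b, rest, rfl⟩ : ∃ a b rest, nums = a :: b :: rest := by
    match nums, hpre with
    | a :: b :: rest, _ => exact ⟨a, b, rest, rfl⟩
  have hget0 : PySem.List.pyGet? (a :: b :: rest) 0 = some a := by
    simp [PySem.List.pyGet?, PySem.List.pyIdx?,
      show (0:Int) ≤ (rest.length : Int) + 1 from by positivity]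
  have hget1 : PySem.List.pyGet? (a :: b :: rest) 1 = some b := by
    simp [PySem.List.pyGet?, PySem.List.pyIdx?]
  unfold determineSafe determineSafe_alt
  rw [hget0, hget1]
  simp only []
  rw [Bool.eq_iff_iff]
  by_cases hab : a < b
  · simp only [if_pos hab]
    rw [zip_all_iff _ (fun x y => decide ((1:Int) ≤ y - x) && decide (y - x ≤ (3:Int)))]
    by_cases hs : PySem.List.sorted (a :: b :: rest) (fun x => x) false = a :: b :: rest
    · rw [if_neg (by simpa using hs), loopA_true_iff]
      have hadj := (pairwise_le_iff_adj _).mp ((sorted_eq_iff_pairwise_le _).mp hs)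
      constructor
      · intro h k hk
        have h1 := h k hk
        have h2 := hadj k hk
        rw [getElem!_pos (a :: b :: rest) (k+1) (by omega), getElem!_pos (a :: b :: rest) k (by omega)] at h1 h2
        rw [abs_le] at h1
        simp only [Bool.and_eq_true, decide_eq_true_eq]
        omega
      · intro h k hk
        have h1 := h k hk
        simp only [Bool.and_eq_true, decide_eq_true_eq] at h1
        rw [getElem!_pos (a :: b :: rest) (k+1) (by omega), getElem!_pos (a :: b :: rest) k (by omega), abs_le]
        omega
    · rw [if_pos (by simpa using hs)]
      simp only [Bool.false_eq_true, false_iff]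
      intro h
      apply hs
      rw [sorted_eq_iff_pairwise_le, pairwise_le_iff_adj]
      intro k hk
      have h1 := h k hk
      simp only [Bool.and_eq_true, decide_eq_true_eq] at h1
      rw [getElem!_pos (a :: b :: rest) (k+1) (by omega), getElem!_pos (a :: b :: rest) k (by omega)]
      omega
  · simp only [if_neg hab]
    rw [zip_all_iff _ (fun x y => decide ((-3:Int) ≤ y - x) && decide (y - x ≤ (-1:Int)))]
    by_cases hs : PySem.List.sorted (a :: b :: rest) (fun x => x) true = a :: b :: rest
    · rw [if_neg (by simpa using hs), loopA_true_iff]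
      have hadj := (pairwise_ge_iff_adj _).mp ((sorted_rev_eq_iff_pairwise_ge _).mp hs)
      constructor
      · intro h k hk
        have h1 := h k hk
        have h2 := hadj k hk
        rw [getElem!_pos (a :: b :: rest) (k+1) (by omega), getElem!_pos (a :: b :: rest) k (by omega)] at h1 h2
        rw [abs_le] at h1
        simp only [Bool.and_eq_true, decide_eq_true_eq]
        omega
      · intro h k hk
        have h1 := h k hk
        simp only [Bool.and_eq_true, decide_eq_true_eq] at h1
        rw [getElem!_pos (a :: b :: rest) (k+1) (by omega), getElem!_pos (a :: b :: rest) k (by omega), abs_le]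
        omega
    · rw [if_pos (by simpa using hs)]
      simp only [Bool.false_eq_true, false_iff]
      intro h
      apply hs
      rw [sorted_rev_eq_iff_pairwise_ge, pairwise_ge_iff_adj]
      intro k hk
      have h1 := h k hk
      simp only [Bool.and_eq_true, decide_eq_true_eq] at h1
      rw [getElem!_pos (a :: b :: rest) (k+1) (by omega), getElem!_pos (a :: b :: rest) k (by omega)]
      omega
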